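-- pv_equiv track=rewrite | github.com/neil793/svd-indexer | indexer/deduplicator.py | _extract_family_from_names
-- ===== SOURCE A (Python) =====
-- from typing import List, Dict, Tuple
--
-- def _extract_family_from_names(devices: List[str]) -> str | None:
--     """
--     Attempt to extract family pattern from device names
--
--     Works for common ARM vendor naming patterns:
--     - STM32: "STM32F407" → "STM32F4"
--     - Nordic: "nRF52840" → "nRF52"
--     - NXP Kinetis: "MK64FN1M0" → "MK64"
--
--     Returns None if no common pattern found.
--     """
--     if not devices:
--         return None
--
--     # STM32 pattern: STM32 + Family Letter + Sub-family Digit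
--     if all(d.startswith("STM32") for d in devices):
--         families = set()
--         for device in devices:
--             suffix = device[5:]  # Remove "STM32" prefix
--             if len(suffix) >= 2:
--                 family = suffix[:2]  # "F407" -> "F4"
--                 families.add(family)
--
--         if len(families) == 1:
--             return f"STM32{list(families)[0]}xx"
--         elif len(families) > 1:
--             return f"STM32 (multiple families)"
--
--     # Nordic pattern: nRF + Series Number
--     if all(d.startswith("nRF") for d in devices):
--         families = set()
--         for device in devices:
--             if len(device) >= 5:
--                 family = device[:5]  # "nRF52840" -> "nRF52"
--                 families.add(family)
--
--         if len(families) == 1: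
--             return f"{list(families)[0]}xxx"
--         elif len(families) > 1:
--             return "nRF (multiple series)"
--
--     # NXP Kinetis pattern: MK + Series Number
--     if all(d.startswith("MK") for d in devices):
--         families = set()
--         for device in devices:
--             if len(device) >= 4:
--                 family = device[:4]  # "MK64FN1M0" -> "MK64"
--                 families.add(family)
--
--         if len(families) == 1:
--             return f"{list(families)[0]}xxx"
--         elif len(families) > 1:
--             return "Kinetis (multiple series)"
--
--     # No recognizable pattern
--     return None
-- ===== SOURCE B (Python) =====
-- from typing import List
--
-- # One-pass rewrite: instead of A's staged per-vendor passes (an all() scan plus a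
-- # set-building loop per vendor), a single loop over the devices maintains, for each
-- # of the three vendor patterns, a prefix flag and a three-valued family tracker
-- # (nothing seen / exactly one family / multiple) -- no sets at all.
--
-- _MANY = object()  # tracker state: more than one distinct family seen
--
-- def _merge(cur, new):
--     """Fold one extracted family (or None) into the tracker state."""
--     if new is None:
--         return cur
--     if cur is None or cur == new:
--         return new
--     return _MANY
--
-- def _extract_family_from_names(devices: List[str]) -> str | None:
--     if not devices:
--         return None
--     stm_ok = nrf_ok = mk_ok = True
--     stm = nrf = mk = None
--     for d in devices:
--         stm_ok = stm_ok and d.startswith("STM32")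
--         nrf_ok = nrf_ok and d.startswith("nRF")
--         mk_ok = mk_ok and d.startswith("MK")
--         stm = _merge(stm, d[5:7] if len(d) >= 7 else None)
--         nrf = _merge(nrf, d[:5] if len(d) >= 5 else None)
--         mk = _merge(mk, d[:4] if len(d) >= 4 else None)
--     if stm_ok:
--         if stm is _MANY:
--             return "STM32 (multiple families)"
--         if stm is not None:
--             return f"STM32{stm}xx"
--     if nrf_ok:
--         if nrf is _MANY:
--             return "nRF (multiple series)"
--         if nrf is not None:
--             return f"{nrf}xxx"
--     if mk_ok:
--         if mk is _MANY:
--             return "Kinetis (multiple series)"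
--         if mk is not None:
--             return f"{mk}xxx"
--     return None
-- ===== Notes on version B (the rewrite author's own statement) =====
-- stated objective: alternative
-- what changed: Replaces A's staged per-vendor passes (an all() prefix scan plus a set-building loop for each vendor, then counting the set) by a single pass over the devices that maintains for each vendor a prefix flag and a three-valued family tracker (none seen / exactly one / multiple), eliminating sets entirely; the final answer is read off the accumulated state.
import Mathlib
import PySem

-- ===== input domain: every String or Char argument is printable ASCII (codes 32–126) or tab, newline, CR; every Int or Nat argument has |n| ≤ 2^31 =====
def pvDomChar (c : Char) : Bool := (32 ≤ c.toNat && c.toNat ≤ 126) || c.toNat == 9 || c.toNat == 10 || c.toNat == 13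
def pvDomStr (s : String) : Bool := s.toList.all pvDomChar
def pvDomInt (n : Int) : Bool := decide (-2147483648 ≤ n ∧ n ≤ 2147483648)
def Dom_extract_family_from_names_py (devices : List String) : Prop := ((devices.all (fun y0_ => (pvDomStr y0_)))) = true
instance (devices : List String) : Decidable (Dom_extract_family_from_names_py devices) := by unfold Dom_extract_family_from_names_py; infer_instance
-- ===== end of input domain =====

-- B replaces A's staged per-vendor passes (prefix scan + set-building loop per vendor) by ONE pass
-- maintaining per vendor a prefix flag and a three-valued family tracker; no sets (objective: alternative).

-- ===== PORT A =====
-- literal transliteration of A: three sequential vendor blocks, early return = Option.orElse chain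
def extract_family_from_names_py (devices : List String) : Option String :=
  if devices = [] then none
  else
    (if devices.all (fun d => PySem.Str.startswith d "STM32") then
       let families := devices.foldl (fun fams device =>
         let suffix := PySem.List.slice device.toList (some 5) none
         if 2 ≤ suffix.length then
           PySem.Set.add fams (PySem.List.slice suffix none (some 2))
         else fams) ([] : PySem.Set (List Char))
       if PySem.Set.len families = 1 then
         some (String.ofList ("STM32".toList ++ families.headD [] ++ "xx".toList))
       else if 1 < PySem.Set.len families then some "STM32 (multiple families)"
       else none
     else none).orElse (fun _ =>
    (if devices.all (fun d => PySem.Str.startswith d "nRF") then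
       let families := devices.foldl (fun fams device =>
         if 5 ≤ PySem.Str.len device then
           PySem.Set.add fams (PySem.List.slice device.toList none (some 5))
         else fams) ([] : PySem.Set (List Char))
       if PySem.Set.len families = 1 then
         some (String.ofList (families.headD [] ++ "xxx".toList))
       else if 1 < PySem.Set.len families then some "nRF (multiple series)"
       else none
     else none).orElse (fun _ =>
    (if devices.all (fun d => PySem.Str.startswith d "MK") then
       let families := devices.foldl (fun fams device =>
         if 4 ≤ PySem.Str.len device then
           PySem.Set.add fams (PySem.List.slice device.toList none (some 4))
         else fams) ([] : PySem.Set (List Char))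
       if PySem.Set.len families = 1 then
         some (String.ofList (families.headD [] ++ "xxx".toList))
       else if 1 < PySem.Set.len families then some "Kinetis (multiple series)"
       else none
     else none)))

-- ===== PORT B =====
-- Source B's three-valued family tracker: nothing seen / exactly one family / multiple (_MANY)
inductive FamState
  | empty : FamState
  | one : List Char → FamState
  | many : FamState
deriving DecidableEq

-- Source B's _merge
def pvMerge : FamState → Option (List Char) → FamState
  | cur, none => cur
  | .empty, some f => .one f
  | .one g, some f => if g = f then .one f else .many
  | .many, some _ => .many

-- the three family extractors of Source B's loop body
def pvStmEx (d : String) : Option (List Char) :=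
  if 7 ≤ PySem.Str.len d then some (PySem.List.slice d.toList (some 5) (some 7)) else none
def pvNrfEx (d : String) : Option (List Char) :=
  if 5 ≤ PySem.Str.len d then some (PySem.List.slice d.toList none (some 5)) else none
def pvMkEx (d : String) : Option (List Char) :=
  if 4 ≤ PySem.Str.len d then some (PySem.List.slice d.toList none (some 4)) else none

-- Source B: one fold over the devices carrying (flag, tracker) for each of the three vendors
def extract_family_from_names_py_alt (devices : List String) : Option String :=
  if devices = [] then none
  else
    let st := devices.foldl (fun st d =>
      ((st.1.1 && PySem.Str.startswith d "STM32", pvMerge st.1.2 (pvStmEx d)),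
       ((st.2.1.1 && PySem.Str.startswith d "nRF", pvMerge st.2.1.2 (pvNrfEx d)),
        (st.2.2.1 && PySem.Str.startswith d "MK", pvMerge st.2.2.2 (pvMkEx d)))))
      (((true, FamState.empty), ((true, FamState.empty), (true, FamState.empty))) :
        (Bool × FamState) × (Bool × FamState) × (Bool × FamState))
    (if st.1.1 then
       match st.1.2 with
       | .many => some "STM32 (multiple families)"
       | .one f => some (String.ofList ("STM32".toList ++ f ++ "xx".toList))
       | .empty => none
     else none).orElse (fun _ =>
    (if st.2.1.1 then
       match st.2.1.2 with
       | .many => some "nRF (multiple series)"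
       | .one f => some (String.ofList (f ++ "xxx".toList))
       | .empty => none
     else none).orElse (fun _ =>
    (if st.2.2.1 then
       match st.2.2.2 with
       | .many => some "Kinetis (multiple series)"
       | .one f => some (String.ofList (f ++ "xxx".toList))
       | .empty => none
     else none)))

-- ===== PRECONDITION & SPEC =====
def Spec_extract_family_from_names_py (devices : List String) (out : Option String) : Prop := out = extract_family_from_names_py_alt devices
instance (devices : List String) (out : Option String) : Decidable (Spec_extract_family_from_names_py devices out) := by unfold Spec_extract_family_from_names_py; infer_instance

-- ===== CLAIM (what is proved, stated in full; the proofs are below) =====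
def Claim_equal_extract_family_from_names_py : Prop := ∀ (devices : List String), Dom_extract_family_from_names_py devices → Spec_extract_family_from_names_py devices (extract_family_from_names_py devices)

-- ===== LEMMAS AND PROOFS =====

-- abstraction map: a Python set of families to Source B's tracker state
def pvClassify : PySem.Set (List Char) → FamState
  | [] => .empty
  | [f] => .one f
  | _ :: _ :: _ => .many

theorem pv_merge_add (s : PySem.Set (List Char)) (x : List Char) :
    pvMerge (pvClassify s) (some x) = pvClassify (PySem.Set.add s x) := by
  rw [PySem.Set.add_eq_ite]
  match s with
  | [] => simp [pvClassify, pvMerge]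
  | [f] =>
    by_cases h : x ∈ [f]
    · simp at h; subst h; simp [pvClassify, pvMerge]
    · simp at h; simp [pvClassify, pvMerge, h, Ne.symm h]
  | a :: b :: t =>
    split
    · simp [pvClassify, pvMerge]
    · simp [pvClassify, pvMerge]

-- Source B's tracker fold computes the classification of A's set fold
theorem pv_fold_classify (ex : String → Option (List Char)) :
    ∀ (ds : List String) (s : PySem.Set (List Char)),
      ds.foldl (fun t d => pvMerge t (ex d)) (pvClassify s)
      = pvClassify (ds.foldl (fun fams d =>
          match ex d with | some f => PySem.Set.add fams f | none => fams) s) := by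
  intro ds
  induction ds with
  | nil => intro s; rfl
  | cons d ds ih =>
    intro s
    simp only [List.foldl_cons]
    cases hex : ex d with
    | none => simp only [pvMerge]; exact ih s
    | some f => simp only [pv_merge_add]; exact ih (PySem.Set.add s f)

-- the same, started from Source B's initial tracker state
theorem pv_fold_classify' (ex : String → Option (List Char)) (ds : List String) :
    ds.foldl (fun t d => pvMerge t (ex d)) FamState.empty
    = pvClassify (ds.foldl (fun fams d =>
        match ex d with | some f => PySem.Set.add fams f | none => fams) []) :=
  pv_fold_classify ex ds []

-- the boolean flag fold is List.all
theorem pv_fold_all (p : String → Bool) :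
    ∀ (ds : List String) (b : Bool), ds.foldl (fun acc d => acc && p d) b = (b && ds.all p) := by
  intro ds
  induction ds with
  | nil => intro b; simp
  | cons d ds ih => intro b; simp [ih, Bool.and_assoc]

-- A's STM32 collection step, written in the extractor/match form
theorem pv_stm_step :
    (fun (fams : PySem.Set (List Char)) device =>
      let suffix := PySem.List.slice device.toList (some 5) none
      if 2 ≤ suffix.length then
        PySem.Set.add fams (PySem.List.slice suffix none (some 2))
      else fams)
    = (fun fams d => match pvStmEx d with | some f => PySem.Set.add fams f | none => fams) := by
  funext fams d
  simp only [pvStmEx, PySem.Str.len_eq]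
  have hlen : d.toList.length = d.length := by simp
  by_cases h : 7 ≤ d.toList.length
  · have h7 : (7 : Int) ≤ (d.length : Int) := by omega
    have h2 : 2 ≤ (PySem.List.slice d.toList (some 5) none).length := by simp [pysem]; omega
    have hsl : PySem.List.slice (PySem.List.slice d.toList (some 5) none) none (some 2)
        = PySem.List.slice d.toList (some 5) (some 7) := by simp [pysem]
    simp [h2, h7, hsl]
  · have h7 : ¬ ((7 : Int) ≤ (d.length : Int)) := by omega
    have h2 : ¬ (2 ≤ (PySem.List.slice d.toList (some 5) none).length) := by simp [pysem]; omega
    simp [h2, h7]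

theorem pv_pfx_step (k : Int) (ex : String → Option (List Char))
    (hex : ex = fun d => if k ≤ PySem.Str.len d then some (PySem.List.slice d.toList none (some k)) else none) :
    (fun (fams : PySem.Set (List Char)) device =>
      if k ≤ PySem.Str.len device then
        PySem.Set.add fams (PySem.List.slice device.toList none (some k))
      else fams)
    = (fun fams d => match ex d with | some f => PySem.Set.add fams f | none => fams) := by
  subst hex; funext fams d
  by_cases h : k ≤ (d.length : Int)
  · simp [h]
  · simp [h]

-- one vendor block: A's set-count branch equals B's tracker match, via pvClassify
theorem pv_branch_eq (S : PySem.Set (List Char)) (fmt : List Char → String) (multi : String) :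
    (if PySem.Set.len S = 1 then some (fmt (S.headD []))
     else if 1 < PySem.Set.len S then some multi else none)
    = (match pvClassify S with
       | .many => some multi
       | .one f => some (fmt f)
       | .empty => none) := by
  match S with
  | [] => rfl
  | [f] => rfl
  | a :: b :: t =>
    simp only [pvClassify, PySem.Set.len]
    have h1 : ¬ (((a :: b :: t).length : Int) = 1) := by simp only [List.length_cons]; push_cast; omega
    have h2 : (1 : Int) < ((a :: b :: t).length : Int) := by simp only [List.length_cons]; push_cast; omega
    rw [if_neg h1, if_pos h2]

set_option maxHeartbeats 1000000 in
theorem extract_family_spec_aux (devices : List String) :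
    extract_family_from_names_py devices = extract_family_from_names_py_alt devices := by
  unfold extract_family_from_names_py extract_family_from_names_py_alt
  by_cases hnil : devices = []
  · simp [hnil]
  · simp only [hnil, if_false]
    -- split B's one combined fold into its six independent accumulators
    rw [PySem.List.foldl_prod_mk
          (f := fun (p : Bool × FamState) d =>
            (p.1 && PySem.Str.startswith d "STM32", pvMerge p.2 (pvStmEx d)))
          (g := fun (q : (Bool × FamState) × (Bool × FamState)) d =>
            ((q.1.1 && PySem.Str.startswith d "nRF", pvMerge q.1.2 (pvNrfEx d)),
             (q.2.1 && PySem.Str.startswith d "MK", pvMerge q.2.2 (pvMkEx d)))),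
        PySem.List.foldl_prod_mk
          (f := fun (p : Bool × FamState) d =>
            (p.1 && PySem.Str.startswith d "nRF", pvMerge p.2 (pvNrfEx d)))
          (g := fun (p : Bool × FamState) d =>
            (p.1 && PySem.Str.startswith d "MK", pvMerge p.2 (pvMkEx d))),
        PySem.List.foldl_prod_mk (f := fun b d => b && PySem.Str.startswith d "STM32")
          (g := fun t d => pvMerge t (pvStmEx d)),
        PySem.List.foldl_prod_mk (f := fun b d => b && PySem.Str.startswith d "nRF")
          (g := fun t d => pvMerge t (pvNrfEx d)),
        PySem.List.foldl_prod_mk (f := fun b d => b && PySem.Str.startswith d "MK")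
          (g := fun t d => pvMerge t (pvMkEx d))]
    simp only [pv_fold_all, Bool.true_and]
    rw [pv_fold_classify' pvStmEx devices, pv_fold_classify' pvNrfEx devices,
        pv_fold_classify' pvMkEx devices, ← pv_stm_step,
        ← pv_pfx_step 5 pvNrfEx rfl, ← pv_pfx_step 4 pvMkEx rfl,
        pv_branch_eq _ (fun f => String.ofList ("STM32".toList ++ f ++ "xx".toList))
          "STM32 (multiple families)",
        pv_branch_eq _ (fun f => String.ofList (f ++ "xxx".toList)) "nRF (multiple series)",
        pv_branch_eq _ (fun f => String.ofList (f ++ "xxx".toList)) "Kinetis (multiple series)"]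

-- ===== VERDICT (by name: the statement is the Claim_ definition above) =====
theorem extract_family_from_names_py_spec : Claim_equal_extract_family_from_names_py := by
  intro devices _
  unfold Spec_extract_family_from_names_py
  exact extract_family_spec_aux devices
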